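-- pv_equiv track=rewrite | github.com/Buscedv/Ask | ask.py | tokens_grouped_by_lines
-- ===== SOURCE A (Python) =====
-- def tokens_grouped_by_lines(tokens):
-- 	tmp = []
-- 	lines = []
--
-- 	for token_index, token in enumerate(tokens):
-- 		token_type = token[0]
-- 		token_val = token[1]
--
-- 		if token_type == 'OP' and token_val in ['\n', '\t']:
-- 			token_type = 'FORMAT'
--
-- 		if token_type == 'FORMAT' and token_val == '\n':
-- 			lines.append(tmp)
-- 			tmp = []
--
-- 		tmp.append([token_type, token_val])
--
-- 	if tmp:
-- 		lines.append(tmp)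
--
-- 	return lines
-- ===== SOURCE B (Python) =====
-- def tokens_grouped_by_lines(tokens):
-- 	processed = []
-- 	breaks = []
-- 	for i, token in enumerate(tokens):
-- 		ftype = 'FORMAT' if token[0] == 'OP' and token[1] in ['\n', '\t'] else token[0]
-- 		if ftype == 'FORMAT' and token[1] == '\n':
-- 			breaks.append(i)
-- 		processed.append([ftype, token[1]])
--
-- 	if not processed:
-- 		return []
--
-- 	cuts = [0] + breaks + [len(processed)]
-- 	return [processed[a:b] for a, b in zip(cuts, cuts[1:])]
-- ===== Notes on version B (the rewrite author's own statement) =====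
-- stated objective: alternative
-- what changed: Replaces A's incremental line accumulator (tmp/lines with flush-on-newline) by a two-phase plan: one pass remaps tokens and records newline break indices, then the result is produced as slices of the processed list between consecutive cut points.
import Mathlib
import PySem

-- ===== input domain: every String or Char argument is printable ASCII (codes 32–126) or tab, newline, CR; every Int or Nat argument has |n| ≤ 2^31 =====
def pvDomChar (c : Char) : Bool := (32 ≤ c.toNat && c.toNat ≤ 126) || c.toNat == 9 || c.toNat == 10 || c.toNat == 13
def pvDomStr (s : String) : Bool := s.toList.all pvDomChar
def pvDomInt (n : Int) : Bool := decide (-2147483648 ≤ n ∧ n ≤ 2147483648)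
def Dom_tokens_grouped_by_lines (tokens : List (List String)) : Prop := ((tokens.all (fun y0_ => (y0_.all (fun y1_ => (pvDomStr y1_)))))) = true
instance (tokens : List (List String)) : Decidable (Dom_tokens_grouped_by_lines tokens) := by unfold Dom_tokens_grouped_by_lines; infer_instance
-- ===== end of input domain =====

-- B groups tokens into lines by a two-phase plan (remap + break indices, then slicing between cut
-- points) instead of A's incremental accumulator; same O(n) cost, different decomposition.

-- ===== PORT A =====
-- loop body of A (token[0]/token[1] out of range is a Python IndexError: excluded by Pre_)
def pvStepA (st : List (List String) × List (List (List String))) (token : List String) :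
    List (List String) × List (List (List String)) :=
  let tokenType := (PySem.List.pyGet? token 0).getD ""
  let tokenVal := (PySem.List.pyGet? token 1).getD ""
  let tokenType := if tokenType = "OP" ∧ (tokenVal = "\n" ∨ tokenVal = "\t") then "FORMAT" else tokenType
  let st' := if tokenType = "FORMAT" ∧ tokenVal = "\n" then (([] : List (List String)), st.2 ++ [st.1]) else st
  (st'.1 ++ [[tokenType, tokenVal]], st'.2)

def tokens_grouped_by_lines (tokens : List (List String)) : List (List (List String)) :=
  let st := tokens.foldl pvStepA ([], [])
  if st.1 ≠ [] then st.2 ++ [st.1] else st.2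

-- ===== PORT B =====
-- loop body of B: builds (processed, breaks)
def pvStepB (st : List (List String) × List Int) (p : Int × List String) :
    List (List String) × List Int :=
  let t0 := (PySem.List.pyGet? p.2 0).getD ""
  let t1 := (PySem.List.pyGet? p.2 1).getD ""
  let ftype := if t0 = "OP" ∧ (t1 = "\n" ∨ t1 = "\t") then "FORMAT" else t0
  (st.1 ++ [[ftype, t1]],
   if ftype = "FORMAT" ∧ t1 = "\n" then st.2 ++ [p.1] else st.2)

def tokens_grouped_by_lines_alt (tokens : List (List String)) : List (List (List String)) :=
  let pb := (PySem.List.enumerate tokens 0).foldl pvStepB ([], [])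
  if pb.1 = [] then []
  else
    let cuts : List Int := 0 :: (pb.2 ++ [(pb.1.length : Int)])
    (cuts.zip cuts.tail).map (fun ab => PySem.List.slice pb.1 (some ab.1) (some ab.2))

-- ===== PRECONDITION & SPEC =====
-- Pre_ excludes exactly the inputs on which the Python A raises IndexError (a token with fewer than two items).
def Pre_tokens_grouped_by_lines (tokens : List (List String)) : Prop :=
  ∀ t ∈ tokens, 2 ≤ t.length
instance (tokens : List (List String)) : Decidable (Pre_tokens_grouped_by_lines tokens) := by
  unfold Pre_tokens_grouped_by_lines; infer_instance

def pvWitness_tokens_grouped_by_lines : List (List String) :=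
  [["OP", "\n"], ["NAME", "x"], ["OP", "+"], ["OP", "\n"]]

def Spec_tokens_grouped_by_lines (tokens : List (List String)) (out : List (List (List String))) : Prop := out = tokens_grouped_by_lines_alt tokens
instance (tokens : List (List String)) (out : List (List (List String))) : Decidable (Spec_tokens_grouped_by_lines tokens out) := by unfold Spec_tokens_grouped_by_lines; infer_instance

-- ===== CLAIM (what is proved, stated in full; the proofs are below) =====
def Claim_equal_tokens_grouped_by_lines : Prop := ∀ (tokens : List (List String)), Dom_tokens_grouped_by_lines tokens → Pre_tokens_grouped_by_lines tokens → Spec_tokens_grouped_by_lines tokens (tokens_grouped_by_lines tokens)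

-- ===== LEMMAS AND PROOFS =====

-- break positions recorded by B, expressed from A's lines: start index of each line's successor
def pvStarts (a : Nat) : List (List (List String)) → List Int
  | [] => []
  | l :: ls => ((a + l.length : Nat) : Int) :: pvStarts (a + l.length) ls

theorem pvStarts_append_singleton (ls : List (List (List String))) (l : List (List String)) :
    ∀ a, pvStarts a (ls ++ [l]) = pvStarts a ls ++ [((a + ls.flatten.length + l.length : Nat) : Int)] := by
  induction ls with
  | nil => intro a; simp [pvStarts]
  | cons x xs ih =>
      intro a
      simp only [List.cons_append, pvStarts, ih, List.flatten_cons, List.length_append]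
      have h3 : a + x.length + xs.flatten.length + l.length
          = a + (x.length + xs.flatten.length) + l.length := by omega
      rw [h3]

theorem pvLoop_inv (ts : List (List String)) :
    ∀ (tmp : List (List String)) (lines : List (List (List String))),
    (PySem.List.enumerate ts ((lines.flatten ++ tmp).length : Int)).foldl pvStepB
        (lines.flatten ++ tmp, pvStarts 0 lines)
      = ((ts.foldl pvStepA (tmp, lines)).2.flatten ++ (ts.foldl pvStepA (tmp, lines)).1,
         pvStarts 0 (ts.foldl pvStepA (tmp, lines)).2) := by
  induction ts with
  | nil => intro tmp lines; simp [PySem.List.enumerate]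
  | cons t ts ih =>
      intro tmp lines
      rw [PySem.List.enumerate_cons, List.foldl_cons, List.foldl_cons]
      by_cases h : ((if (PySem.List.pyGet? t 0).getD "" = "OP" ∧
            ((PySem.List.pyGet? t 1).getD "" = "\n" ∨ (PySem.List.pyGet? t 1).getD "" = "\t")
          then "FORMAT" else (PySem.List.pyGet? t 0).getD "") = "FORMAT")
          ∧ (PySem.List.pyGet? t 1).getD "" = "\n"
      · -- newline token: A flushes tmp into lines, B records a break
        have hA : pvStepA (tmp, lines) t =
            ([[ "FORMAT", (PySem.List.pyGet? t 1).getD ""]] , lines ++ [tmp]) := by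
          simp only [pvStepA, if_pos h]
          simp [h.1]
        have hB : pvStepB (lines.flatten ++ tmp, pvStarts 0 lines)
              (((lines.flatten ++ tmp).length : Int), t) =
            ((lines.flatten ++ tmp) ++ [["FORMAT", (PySem.List.pyGet? t 1).getD ""]],
             pvStarts 0 lines ++ [((lines.flatten ++ tmp).length : Int)]) := by
          simp only [pvStepB, if_pos h]
          simp [h.1]
        rw [hA, hB]
        have hs : pvStarts 0 lines ++ [((lines.flatten ++ tmp).length : Int)]
            = pvStarts 0 (lines ++ [tmp]) := by
          rw [pvStarts_append_singleton]
          simp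
        have hp : (lines.flatten ++ tmp) ++ [["FORMAT", (PySem.List.pyGet? t 1).getD ""]]
            = (lines ++ [tmp]).flatten ++ [["FORMAT", (PySem.List.pyGet? t 1).getD ""]] := by
          simp
        rw [hs, hp]
        have := ih [["FORMAT", (PySem.List.pyGet? t 1).getD ""]] (lines ++ [tmp])
        have hlen : (((lines ++ [tmp]).flatten ++ [["FORMAT", (PySem.List.pyGet? t 1).getD ""]]).length : Int)
            = ((lines.flatten ++ tmp).length : Int) + 1 := by
          simp; omega
        rw [← hlen]
        exact this
      · -- ordinary token: A appends to tmp, B appends to processed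
        set ft := (if (PySem.List.pyGet? t 0).getD "" = "OP" ∧
            ((PySem.List.pyGet? t 1).getD "" = "\n" ∨ (PySem.List.pyGet? t 1).getD "" = "\t")
          then "FORMAT" else (PySem.List.pyGet? t 0).getD "") with hft
        have hA : pvStepA (tmp, lines) t = (tmp ++ [[ft, (PySem.List.pyGet? t 1).getD ""]], lines) := by
          simp only [pvStepA, ← hft, if_neg h]
        have hB : pvStepB (lines.flatten ++ tmp, pvStarts 0 lines)
              (((lines.flatten ++ tmp).length : Int), t) =
            ((lines.flatten ++ tmp) ++ [[ft, (PySem.List.pyGet? t 1).getD ""]], pvStarts 0 lines) := by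
          simp only [pvStepB, ← hft, if_neg h]
        rw [hA, hB]
        have hp : (lines.flatten ++ tmp) ++ [[ft, (PySem.List.pyGet? t 1).getD ""]]
            = lines.flatten ++ (tmp ++ [[ft, (PySem.List.pyGet? t 1).getD ""]]) := by
          simp
        rw [hp]
        have := ih (tmp ++ [[ft, (PySem.List.pyGet? t 1).getD ""]]) lines
        have hlen : ((lines.flatten ++ (tmp ++ [[ft, (PySem.List.pyGet? t 1).getD ""]])).length : Int)
            = ((lines.flatten ++ tmp).length : Int) + 1 := by
          simp; omega
        rw [← hlen]
        exact this

theorem pvStepA_fst_ne (st : List (List String) × List (List (List String))) (t : List String) :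
    (pvStepA st t).1 ≠ [] := by
  simp only [pvStepA]
  split <;> simp

theorem pvFoldA_fst_ne (ts : List (List String)) :
    ∀ st, st.1 ≠ [] → (ts.foldl pvStepA st).1 ≠ [] := by
  induction ts with
  | nil => intro st h; exact h
  | cons t ts ih => intro st _; exact ih (pvStepA st t) (pvStepA_fst_ne st t)

theorem pvSlices_spec (lines : List (List (List String))) (tmp : List (List String)) :
    ∀ (a : Nat) (pre full : List (List String)), pre.length = a →
      full = pre ++ lines.flatten ++ tmp →
      (let cuts : List Int := (a : Int) :: (pvStarts a lines ++ [((a + lines.flatten.length + tmp.length : Nat) : Int)]);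
       (cuts.zip cuts.tail).map (fun ab => PySem.List.slice full (some ab.1) (some ab.2)))
        = lines ++ [tmp] := by
  induction lines with
  | nil =>
      intro a pre full hpre hfull
      simp only [pvStarts, List.nil_append, List.zip_cons_cons, List.tail_cons, List.zip_nil_right,
        List.map_cons, List.map_nil, List.flatten_nil, List.length_nil, Nat.add_zero]
      have hc : ((a + tmp.length : Nat) : Int) = ((a : Nat) : Int) + ((tmp.length : Nat) : Int) := by
        push_cast; ring
      rw [hc, PySem.List.slice_natCast_add, hfull]
      subst hpre
      simp only [List.flatten_nil, List.append_nil, List.drop_left, List.take_length]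
  | cons l ls ih =>
      intro a pre full hpre hfull
      simp only [pvStarts, List.cons_append, List.zip_cons_cons, List.tail_cons, List.map_cons,
        List.flatten_cons]
      have h1 : PySem.List.slice full (some (a : Int)) (some ((a + l.length : Nat) : Int)) = l := by
        have hca : ((a + l.length : Nat) : Int) = ((a : Nat) : Int) + ((l.length : Nat) : Int) := by
          push_cast; ring
        rw [hca, PySem.List.slice_natCast_add, hfull]
        subst hpre
        simp only [List.flatten_cons, List.append_assoc, List.drop_left, List.take_left]
      rw [h1]
      have harith : a + (l.length + ls.flatten.length) + tmp.length
          = a + l.length + ls.flatten.length + tmp.length := by omega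
      rw [List.length_append, harith]
      have h2 := ih (a + l.length) (pre ++ l) full (by simp [hpre])
        (by rw [hfull]; simp)
      simp only [List.tail_cons] at h2
      rw [h2]

-- ===== VERDICT (by name: the statement is the Claim_ definition above) =====
theorem tokens_grouped_by_lines_spec : Claim_equal_tokens_grouped_by_lines := by
  intro tokens _ _
  unfold Spec_tokens_grouped_by_lines tokens_grouped_by_lines tokens_grouped_by_lines_alt
  cases tokens with
  | nil => rfl
  | cons t ts =>
      have hinv := pvLoop_inv (t :: ts) [] []
      simp only [List.flatten_nil, List.nil_append, List.length_nil, Nat.cast_zero, pvStarts] at hinv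
      set st := (t :: ts).foldl pvStepA ([], []) with hst
      have htmp : st.1 ≠ [] := by
        rw [hst, List.foldl_cons]
        exact pvFoldA_fst_ne ts _ (pvStepA_fst_ne ([], []) t)
      rw [hinv]
      simp only [if_pos htmp]
      have hproc : st.2.flatten ++ st.1 ≠ [] := by
        intro h
        exact htmp (List.append_eq_nil_iff.mp h).2
      rw [if_neg hproc]
      have hsl := pvSlices_spec st.2 st.1 0 [] (st.2.flatten ++ st.1) rfl (by simp)
      simp only [Nat.cast_zero, Nat.zero_add] at hsl
      simp only [List.length_append]
      exact hsl.symm
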